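-- pv_equiv track=rewrite | github.com/MeUSone/RedditAITAWebScraping | comet.py | seePron
-- ===== SOURCE A (Python) =====
-- def seePron(document, pron):
--
--     n = 0
--     doc = {}
--     for obj in document:
--         doc.update({n: obj})
--         n = n + 1
--
--     clus_all = []
--     cluster = []
--     for i in range(0, len(pron)):
--         one_cl = pron[i]
--         for count in range(0, len(one_cl)):
--             obj = one_cl[count]
--             for num in range((obj[0]), (obj[1] + 1)):
--                 for n in doc:
--                     if num == n:
--                         cluster.append(doc[n])
--         clus_all.append(cluster)
--         cluster = []
--     return clus_all
-- ===== SOURCE B (Python) =====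
-- def seePron(document, pron):
--     docs = list(document)
--     clus_all = []
--     for group in pron:
--         cluster = []
--         for obj in group:
--             cluster.extend(docs[max(obj[0], 0):max(obj[1] + 1, 0)])
--         clus_all.append(cluster)
--     return clus_all
-- ===== Notes on version B (the rewrite author's own statement) =====
-- stated objective: faster
-- what changed: B drops A's index->document dict and its full-dict scan per range element, emitting each (start,end) range as one clamped list slice extended onto the cluster.
import Mathlib
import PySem

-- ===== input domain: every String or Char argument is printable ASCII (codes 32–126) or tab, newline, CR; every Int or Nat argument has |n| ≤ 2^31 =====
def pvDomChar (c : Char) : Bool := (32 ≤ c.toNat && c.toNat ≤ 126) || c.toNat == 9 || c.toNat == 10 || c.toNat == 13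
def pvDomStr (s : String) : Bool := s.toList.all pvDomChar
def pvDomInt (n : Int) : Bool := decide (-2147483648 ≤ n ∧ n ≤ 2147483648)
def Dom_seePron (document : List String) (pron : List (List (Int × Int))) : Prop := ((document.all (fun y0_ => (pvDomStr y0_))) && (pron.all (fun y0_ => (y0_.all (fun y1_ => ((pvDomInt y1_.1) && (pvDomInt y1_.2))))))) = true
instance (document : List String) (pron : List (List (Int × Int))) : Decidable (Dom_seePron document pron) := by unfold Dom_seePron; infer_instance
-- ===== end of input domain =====

-- B replaces A's per-index scan of an index→document dict by a single clamped slice per range,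
-- collecting each cluster with extend; return value equivalence is proved for all inputs.

-- ===== PORT A =====
def seePron (document : List String) (pron : List (List (Int × Int))) : List (List String) :=
  -- n = 0; doc = {}; for obj in document: doc.update({n: obj}); n = n + 1
  let doc := (document.foldl (fun (p : PySem.Dict Int String × Int) obj =>
      (p.1.insert p.2 obj, p.2 + 1)) (PySem.Dict.empty, 0)).1
  let st := (PySem.List.pyRange 0 (PySem.List.len pron) 1).foldl
    (fun (st : List (List String) × List String) i =>
      let one_cl := PySem.List.pyGetD pron i []
      let cluster := (PySem.List.pyRange 0 (PySem.List.len one_cl) 1).foldl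
        (fun cluster count =>
          let obj := PySem.List.pyGetD one_cl count (0, 0)
          (PySem.List.pyRange obj.1 (obj.2 + 1) 1).foldl
            (fun cluster num =>
              -- 'for n in doc: if num == n: cluster.append(doc[n])'; n is a key of doc, so getD is exact
              doc.keys.foldl (fun cluster n =>
                if num == n then cluster ++ [doc.getD n ""] else cluster) cluster)
            cluster)
        st.2
      (st.1 ++ [cluster], []))
    ([], [])
  st.1

-- ===== PORT B =====
def seePron_alt (document : List String) (pron : List (List (Int × Int))) : List (List String) :=
  let docs := document
  pron.foldl (fun clus_all group =>
    clus_all ++ [group.foldl (fun cluster obj =>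
      cluster ++ PySem.List.slice docs (some (max obj.1 0)) (some (max (obj.2 + 1) 0))) []]) []

-- ===== PRECONDITION & SPEC =====
def Spec_seePron (document : List String) (pron : List (List (Int × Int))) (out : List (List String)) : Prop := out = seePron_alt document pron
instance (document : List String) (pron : List (List (Int × Int))) (out : List (List String)) : Decidable (Spec_seePron document pron out) := by unfold Spec_seePron; infer_instance

-- ===== CLAIM (what is proved, stated in full; the proofs are below) =====
def Claim_equal_seePron : Prop := ∀ (document : List String) (pron : List (List (Int × Int))), Dom_seePron document pron → Spec_seePron document pron (seePron document pron)

-- ===== LEMMAS AND PROOFS =====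

-- A's index→document dictionary and the stages of A's nested loops (all defeq to the port's lambdas)
def pvBuild (document : List String) : PySem.Dict Int String :=
  (document.foldl (fun (p : PySem.Dict Int String × Int) obj =>
      (p.1.insert p.2 obj, p.2 + 1)) (PySem.Dict.empty, 0)).1

def pvScanF (document : List String) : List String → Int → List String :=
  fun cluster num => (pvBuild document).keys.foldl (fun cluster n =>
    if num == n then cluster ++ [(pvBuild document).getD n ""] else cluster) cluster

def pvObjF (document : List String) : List String → (Int × Int) → List String :=
  fun cluster obj => (PySem.List.pyRange obj.1 (obj.2 + 1) 1).foldl (pvScanF document) cluster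

def pvClF (document : List String) :
    (List (List String) × List String) → List (Int × Int) → (List (List String) × List String) :=
  fun st one_cl =>
    (st.1 ++ [(PySem.List.pyRange 0 (PySem.List.len one_cl) 1).foldl
      (fun cluster count => pvObjF document cluster (PySem.List.pyGetD one_cl count (0, 0))) st.2], [])

theorem pvBuild_get?_gen (xs : List String) (d : PySem.Dict Int String) (n k : Int) :
    ((xs.foldl (fun (p : PySem.Dict Int String × Int) obj =>
        (p.1.insert p.2 obj, p.2 + 1)) (d, n)).1).get? k =
    if n ≤ k ∧ k < n + xs.length then some (xs.getD (k - n).toNat "") else d.get? k := by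
  induction xs generalizing d n with
  | nil => simp
  | cons x t ih =>
    simp only [List.foldl_cons, ih, List.length_cons]
    by_cases hk : k = n
    · subst hk
      simp [PySem.Dict.get?_insert_self]
    · rw [PySem.Dict.get?_insert_of_ne _ _ hk]
      by_cases h1 : n + 1 ≤ k ∧ k < n + 1 + t.length
      · rw [if_pos h1, if_pos (by omega)]
        have h2 : (k - n).toNat = (k - (n + 1)).toNat + 1 := by omega
        simp [h2]
      · rw [if_neg h1, if_neg (by omega)]

theorem pvBuild_keys_gen (xs : List String) (d : PySem.Dict Int String) (n : Int)
    (h : ∀ k ∈ d.keys, k < n) :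
    ((xs.foldl (fun (p : PySem.Dict Int String × Int) obj =>
        (p.1.insert p.2 obj, p.2 + 1)) (d, n)).1).keys =
    d.keys ++ PySem.List.pyRange n (n + xs.length) 1 := by
  induction xs generalizing d n with
  | nil =>
    simp only [List.foldl_nil, List.length_nil, Nat.cast_zero, add_zero]
    rw [PySem.List.pyRange_one_eq_nil (le_refl n)]
    simp
  | cons x t ih =>
    simp only [List.foldl_cons, List.length_cons]
    have hc : d.contains n = false := by
      rw [PySem.Dict.contains_eq_decide_mem_keys]
      simp only [decide_eq_false_iff_not]
      intro hmem
      exact absurd (h n hmem) (lt_irrefl n)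
    rw [ih (d.insert n x) (n + 1) (by
      intro k hk
      rw [PySem.Dict.keys_insert_of_not_contains _ _ hc] at hk
      rcases List.mem_append.mp hk with hk | hk
      · exact lt_trans (h k hk) (by omega)
      · simp at hk; omega)]
    rw [PySem.Dict.keys_insert_of_not_contains _ _ hc]
    rw [show n + (((t.length + 1 : Nat) : Int)) = n + 1 + (t.length : Int) by push_cast; omega]
    rw [PySem.List.pyRange_one_cons (show n < n + 1 + (t.length : Int) by omega)]
    rw [show n + 1 + (t.length : Int) = n + 1 + ((t.length : Nat) : Int) from rfl]
    simp [List.append_assoc]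

theorem pvBuild_get? (xs : List String) (k : Int) :
    (pvBuild xs).get? k =
    if 0 ≤ k ∧ k < (xs.length : Int) then some (xs.getD k.toNat "") else none := by
  unfold pvBuild
  rw [pvBuild_get?_gen]
  simp [PySem.Dict.get?_empty]

theorem pvBuild_keys (xs : List String) :
    (pvBuild xs).keys = PySem.List.pyRange 0 (xs.length : Int) 1 := by
  unfold pvBuild
  rw [pvBuild_keys_gen xs _ _ (by simp)]
  simp

-- the filter a nodup key list leaves for 'num == n'
theorem pvFilter_nodup (L : List Int) (num : Int) (hnd : L.Nodup) :
    L.filter (fun n => num == n) = if num ∈ L then [num] else [] := by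
  induction L with
  | nil => simp
  | cons a t ih =>
    rcases List.nodup_cons.mp hnd with ⟨ha, ht⟩
    by_cases h : num = a
    · subst h
      simp [ih ht, ha]
    · simp [ih ht, h]

-- A's whole-dict scan for one num appends at most one document
theorem pvScan (xs : List String) (num : Int) (cl : List String) :
    pvScanF xs cl num =
    cl ++ (if 0 ≤ num ∧ num < (xs.length : Int) then [xs.getD num.toNat ""] else []) := by
  unfold pvScanF
  rw [PySem.List.foldl_append_if]
  rw [pvBuild_keys, pvFilter_nodup _ _ (PySem.List.nodup_pyRange_one _ _)]
  by_cases h : 0 ≤ num ∧ num < (xs.length : Int)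
  · have hmem : num ∈ PySem.List.pyRange 0 (xs.length : Int) 1 :=
      PySem.List.mem_pyRange_one.mpr ⟨h.1, h.2⟩
    rw [if_pos hmem, if_pos h]
    simp [PySem.Dict.getD_eq_get?_getD, pvBuild_get?, h]
  · have hmem : num ∉ PySem.List.pyRange 0 (xs.length : Int) 1 := fun hm =>
      h ⟨(PySem.List.mem_pyRange_one.mp hm).1, (PySem.List.mem_pyRange_one.mp hm).2⟩
    rw [if_neg hmem, if_neg h]
    simp

-- the num-range loop IS the clamped slice
theorem pvRangeSlice (xs : List String) (a c : Int) (cl : List String) :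
    (PySem.List.pyRange a c 1).foldl (fun cl num =>
        cl ++ (if 0 ≤ num ∧ num < (xs.length : Int) then [xs.getD num.toNat ""] else [])) cl =
    cl ++ PySem.List.slice xs (some (max a 0)) (some (max c 0)) := by
  generalize hm : (c - a).toNat = m
  induction m generalizing a cl with
  | zero =>
    rw [PySem.List.pyRange_one_eq_nil (by omega), List.foldl_nil,
        PySem.List.slice_toNat _ (by omega) (by omega)]
    have h0 : (max c 0).toNat - (max a 0).toNat = 0 := by omega
    rw [h0]
    simp
  | succ m ih =>
    have ha : a < c := by omega
    rw [PySem.List.pyRange_one_cons ha, List.foldl_cons, ih (a + 1) _ (by omega)]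
    rw [List.append_assoc]
    congr 1
    rw [PySem.List.slice_toNat _ (by omega) (by omega),
        PySem.List.slice_toNat _ (by omega) (by omega)]
    by_cases h0 : 0 ≤ a
    · by_cases hl : a < (xs.length : Int)
      · rw [if_pos ⟨h0, hl⟩]
        have hmax : (max a 0).toNat = a.toNat := by omega
        have hmax1 : (max (a + 1) 0).toNat = a.toNat + 1 := by omega
        have hlt : a.toNat < xs.length := by omega
        rw [hmax, hmax1, List.drop_eq_getElem_cons hlt]
        have hc : (max c 0).toNat - a.toNat = ((max c 0).toNat - (a.toNat + 1)) + 1 := by omega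
        rw [hc, List.take_succ_cons, List.getD_eq_getElem _ _ hlt]
        simp
      · rw [if_neg (by omega)]
        rw [List.drop_eq_nil_of_le (by omega), List.drop_eq_nil_of_le (by omega)]
        simp
    · rw [if_neg (by omega)]
      have hmx : max a 0 = max (a + 1) 0 := by omega
      rw [hmx]
      simp

-- each obj of a group contributes exactly its clamped slice
theorem pvObjF_eq (document : List String) (cl : List String) (obj : Int × Int) :
    pvObjF document cl obj =
    cl ++ PySem.List.slice document (some (max obj.1 0)) (some (max (obj.2 + 1) 0)) := by
  unfold pvObjF
  rw [PySem.List.foldl_congr_mem _ (pvScanF document) (fun cl num =>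
      cl ++ (if 0 ≤ num ∧ num < (document.length : Int) then [document.getD num.toNat ""] else []))
    cl (fun acc x _ => pvScan document x acc)]
  exact pvRangeSlice document obj.1 (obj.2 + 1) cl

-- A's per-group indexed loop is the direct fold over the group
theorem pvClF_eq (document : List String) (st : List (List String) × List String)
    (one_cl : List (Int × Int)) :
    pvClF document st one_cl = (st.1 ++ [one_cl.foldl (pvObjF document) st.2], []) := by
  unfold pvClF
  rw [PySem.List.foldl_pyRange_pyGetD (xs := one_cl) (d := ((0, 0) : Int × Int))
    (f := pvObjF document) (init := st.2) (a := 0) (by omega)]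
  simp

-- A's outer indexed loop is the direct fold over pron
theorem pvA_form (document : List String) (pron : List (List (Int × Int))) :
    seePron document pron = (pron.foldl (pvClF document) ([], [])).1 := by
  have h := PySem.List.foldl_pyRange_pyGetD (xs := pron) (d := ([] : List (Int × Int)))
    (f := pvClF document) (init := (([], []) : List (List String) × List String)) (a := 0) (by omega)
  calc seePron document pron
      = ((PySem.List.pyRange 0 (PySem.List.len pron) 1).foldl
          (fun acc j => pvClF document acc (PySem.List.pyGetD pron j [])) ([], [])).1 := rfl
    _ = ((pron.drop (0 : Int).toNat).foldl (pvClF document) ([], [])).1 := by rw [h]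
    _ = (pron.foldl (pvClF document) ([], [])).1 := by simp

-- A's outer loop with its always-reset cluster state
theorem pvOuter (s : (Int × Int) → List String) (pron : List (List (Int × Int)))
    (acc : List (List String)) :
    (pron.foldl (fun (st : List (List String) × List String) one_cl =>
        (st.1 ++ [one_cl.foldl (fun cl obj => cl ++ s obj) st.2], [])) (acc, [])).1 =
    pron.foldl (fun clus_all group =>
        clus_all ++ [group.foldl (fun cl obj => cl ++ s obj) []]) acc := by
  induction pron generalizing acc with
  | nil => rfl
  | cons g t ih => simpa using ih (acc ++ [g.foldl (fun cl obj => cl ++ s obj) []])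

-- ===== VERDICT (by name: the statement is the Claim_ definition above) =====
theorem seePron_spec : Claim_equal_seePron := by
  intro document pron _
  unfold Spec_seePron
  rw [pvA_form]
  have h1 : ∀ (st : List (List String) × List String) (one_cl : List (Int × Int)),
      pvClF document st one_cl =
      (st.1 ++ [one_cl.foldl (fun cl (obj : Int × Int) =>
        cl ++ PySem.List.slice document (some (max obj.1 0)) (some (max (obj.2 + 1) 0))) st.2], []) := by
    intro st one_cl
    rw [pvClF_eq]
    exact congrArg (fun z => (st.1 ++ [z], ([] : List String)))
      (PySem.List.foldl_congr_mem _ (pvObjF document) _ st.2 (fun acc x _ => pvObjF_eq document acc x))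
  rw [PySem.List.foldl_congr_mem _ (pvClF document) _ ([], []) (fun acc x _ => h1 acc x)]
  exact pvOuter _ pron []
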